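-- pv_equiv track=rewrite | github.com/1337tester/python-learning | Courses/6_00_2_MITx Introduction to Computational Thinking and Data Science/PS1/ps1.py | greedy_cow_transport
-- ===== SOURCE A (Python) =====
-- def greedy_cow_transport(cows,limit=10):
--     """
--     Uses a greedy heuristic to determine an allocation of cows that attempts to
--     minimize the number of spaceship trips needed to transport all the cows. The
--     returned allocation of cows may or may not be optimal.
--     The greedy heuristic should follow the following method:
--
--     1. As long as the current trip can fit another cow, add the largest cow that will fit
--         to the trip
--     2. Once the trip is full, begin a new trip to transport the remaining cows
--
--     Does not mutate the given dictionary of cows.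
--
--     Parameters:
--     cows - a dictionary of name (string), weight (int) pairs
--     limit - weight limit of the spaceship (an int)
--
--     Returns:
--     A list of lists, with each inner list containing the names of cows
--     transported on a particular trip and the overall list containing all the
--     trips
--     """
--     kravy = cows.copy()
--     for krava in cows:
--         if cows[krava] > limit:
--             del kravy[krava]
--     result = []
--     while kravy != {}:
--         miniresult = []
--         weight = 0
--         values = sorted(kravy.values(), reverse = True)
--         for kg_krava in values:
--             if kg_krava + weight <= limit:
--                 for krava in kravy:
--                     if kravy[krava] == kg_krava:
--                         kravka = krava
--                         break
--                 miniresult.append(kravka)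
--                 del kravy[kravka]
--                 weight += kg_krava
--         result.append(miniresult)
--     return result
-- ===== SOURCE B (Python) =====
-- def greedy_cow_transport(cows, limit=10):
--     # Sort the transportable cows once, heaviest first (ties keep dict order);
--     # each trip is then a single first-fit scan over the remaining cows.
--     remaining = sorted([(name, w) for name, w in cows.items() if w <= limit],
--                        key=lambda p: -p[1])
--     trips = []
--     while remaining:
--         trip = []
--         rest = []
--         room = limit
--         for name, w in remaining:
--             if w <= room:
--                 trip.append(name)
--                 room -= w
--             else:
--                 rest.append((name, w))
--         trips.append(trip)
--         remaining = rest
--     return trips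
-- ===== Notes on version B (the rewrite author's own statement) =====
-- stated objective: faster
-- what changed: A re-sorts the remaining weights on every trip and, for every loaded cow, rescans the whole dict to find a cow of that weight; B sorts the (name, weight) pairs once, heaviest first with dict order breaking ties, and fills each trip with a single first-fit scan over the remaining sorted list.
import Mathlib
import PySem

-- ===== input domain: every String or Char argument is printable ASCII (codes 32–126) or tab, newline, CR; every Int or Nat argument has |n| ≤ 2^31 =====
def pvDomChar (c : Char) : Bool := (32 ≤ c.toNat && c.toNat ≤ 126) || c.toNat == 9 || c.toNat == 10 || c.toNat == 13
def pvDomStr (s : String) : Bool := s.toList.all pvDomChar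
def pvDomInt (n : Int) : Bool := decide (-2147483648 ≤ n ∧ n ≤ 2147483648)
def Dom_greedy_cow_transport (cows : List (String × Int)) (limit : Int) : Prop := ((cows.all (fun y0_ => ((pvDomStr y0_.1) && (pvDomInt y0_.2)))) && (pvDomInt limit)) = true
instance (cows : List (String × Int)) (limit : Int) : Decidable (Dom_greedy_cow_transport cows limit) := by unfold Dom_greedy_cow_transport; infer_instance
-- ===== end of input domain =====

-- B replaces A's per-trip re-sort of the remaining dict and per-cow linear dict scan
-- by ONE initial sort of the (name, weight) pairs plus a single first-fit scan per trip
-- (objective: faster). Equivalence of the RETURN value on all inputs; neither mutates.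

-- ===== PORT A =====
-- inner body of A's 'for kg_krava in values' loop; state = (miniresult, weight, kravy)
def gctStepA (limit : Int) (st : List String × Int × PySem.Dict String Int) (kg : Int) :
    List String × Int × PySem.Dict String Int :=
  if kg + st.2.1 ≤ limit then
    -- 'for krava in kravy: if kravy[krava] == kg_krava: kravka = krava; break'
    match st.2.2.items.find? (fun p => p.2 == kg) with
    | some p => (st.1 ++ [p.1], kg + st.2.1, st.2.2.erase p.1)
    | none => st  -- unreachable: kg is drawn from kravy.values, so a matching cow remains
  else st

-- A's 'while kravy != {}' loop; each trip loads ≥ 1 cow, so fuel = kravy.size + 1 suffices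
def gctLoopA (limit : Int) : Nat → PySem.Dict String Int → List (List String) → List (List String)
  | 0, _, result => result
  | fuel + 1, kravy, result =>
    if kravy.items = [] then result
    else
      let values := PySem.List.sorted kravy.values (fun v => v) true
      let st := values.foldl (gctStepA limit) ([], 0, kravy)
      gctLoopA limit fuel st.2.2 (result ++ [st.1])

def greedy_cow_transport (cows : List (String × Int)) (limit : Int) : List (List String) :=
  let d : PySem.Dict String Int := PySem.Dict.ofList cows
  -- 'kravy = cows.copy(); for krava in cows: if cows[krava] > limit: del kravy[krava]'
  let kravy := d.keys.foldl (fun kr krava => if limit < d.getD krava 0 then kr.erase krava else kr) d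
  gctLoopA limit (kravy.size + 1) kravy []

-- ===== PORT B =====
-- body of B's 'for name, w in remaining' scan; state = (trip, rest, room)
def gctStepB (st : List String × List (String × Int) × Int) (p : String × Int) :
    List String × List (String × Int) × Int :=
  if p.2 ≤ st.2.2 then (st.1 ++ [p.1], st.2.1, st.2.2 - p.2)
  else (st.1, st.2.1 ++ [p], st.2.2)

-- B's 'while remaining' loop; each trip takes ≥ 1 cow, so fuel = remaining.length + 1 suffices
def gctLoopB (limit : Int) : Nat → List (String × Int) → List (List String) → List (List String)
  | 0, _, trips => trips
  | fuel + 1, remaining, trips =>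
    if remaining = [] then trips
    else
      let st := remaining.foldl gctStepB ([], [], limit)
      gctLoopB limit fuel st.2.1 (trips ++ [st.1])

def greedy_cow_transport_alt (cows : List (String × Int)) (limit : Int) : List (List String) :=
  let remaining := PySem.List.sorted
      (((PySem.Dict.ofList cows).items).filter (fun p => p.2 ≤ limit))
      (fun p => -p.2) false
  gctLoopB limit (remaining.length + 1) remaining []

-- ===== PRECONDITION & SPEC =====
def Spec_greedy_cow_transport (cows : List (String × Int)) (limit : Int) (out : List (List String)) : Prop := out = greedy_cow_transport_alt cows limit
instance (cows : List (String × Int)) (limit : Int) (out : List (List String)) : Decidable (Spec_greedy_cow_transport cows limit out) := by unfold Spec_greedy_cow_transport; infer_instance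

-- ===== CLAIM (what is proved, stated in full; the proofs are below) =====
def Claim_equal_greedy_cow_transport : Prop := ∀ (cows : List (String × Int)) (limit : Int), Dom_greedy_cow_transport cows limit → Spec_greedy_cow_transport cows limit (greedy_cow_transport cows limit)

-- ===== LEMMAS AND PROOFS =====

-- find? returns the head of the filtered list
lemma gct_find?_of_filter {α : Type} (p : α → Bool) :
    ∀ (l : List α) (x : α) (t : List α), l.filter p = x :: t → l.find? p = some x := by
  intro l
  induction l with
  | nil => intro x t h; simp at h
  | cons a l ih =>
    intro x t h
    by_cases ha : p a = true
    · simp [List.filter_cons, ha] at h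
      simp [List.find?_cons, h.1 ▸ ha, h.1]
    · simp only [Bool.not_eq_true] at ha
      simp [List.filter_cons, ha] at h
      simp [List.find?_cons, ha]
      exact ih x t h

-- insertBy puts x in front when it sorts before everything
lemma gct_insertBy_all {α : Type} (before : α → α → Bool) (x : α) :
    ∀ (l : List α), (∀ z ∈ l, before x z = true) → PySem.List.insertBy before x l = x :: l := by
  intro l h
  cases l with
  | nil => rfl
  | cons y ys => simp [PySem.List.insertBy, h y (by simp)]

-- insertBy preserves sortedness
lemma gct_pairwise_insertBy {α : Type} (key : α → Int) (x : α) :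
    ∀ (l : List α), l.Pairwise (fun a b => key a ≤ key b) →
      (PySem.List.insertBy (fun a b => decide (key a < key b)) x l).Pairwise
        (fun a b => key a ≤ key b) := by
  intro l
  induction l with
  | nil => intro _; simp [PySem.List.insertBy]
  | cons y ys ih =>
    intro h
    rw [List.pairwise_cons] at h
    by_cases hlt : key x < key y
    · simp only [PySem.List.insertBy, hlt, decide_true, if_pos]
      refine List.pairwise_cons.mpr ⟨?_, List.pairwise_cons.mpr h⟩
      intro z hz
      rcases List.mem_cons.mp hz with rfl | hz'
      · exact le_of_lt hlt
      · exact le_of_lt (lt_of_lt_of_le hlt (h.1 z hz'))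
    · simp only [PySem.List.insertBy, hlt, decide_false, Bool.false_eq_true, if_false]
      refine List.pairwise_cons.mpr ⟨?_, ih h.2⟩
      intro z hz
      rw [PySem.List.mem_insertBy] at hz
      rcases hz with rfl | hz
      · omega
      · exact h.1 z hz

-- filtering commutes with a single sorted insertion
lemma gct_filter_insertBy {α : Type} (key : α → Int) (P : α → Bool) (x : α) :
    ∀ (l : List α), l.Pairwise (fun a b => key a ≤ key b) →
      (PySem.List.insertBy (fun a b => decide (key a < key b)) x l).filter P
        = if P x then PySem.List.insertBy (fun a b => decide (key a < key b)) x (l.filter P)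
          else l.filter P := by
  intro l
  induction l with
  | nil => intro _; simp [PySem.List.insertBy, List.filter_cons]
  | cons y ys ih =>
    intro h
    rw [List.pairwise_cons] at h
    by_cases hlt : key x < key y
    · simp only [PySem.List.insertBy, hlt, decide_true, if_pos]
      by_cases hx : P x = true
      · simp only [List.filter_cons, hx, if_pos, if_true]
        by_cases hy : P y = true
        · simp [List.filter_cons, hy, PySem.List.insertBy, hlt]
        · simp only [Bool.not_eq_true] at hy
          simp only [List.filter_cons, hy, Bool.false_eq_true, if_false]
          rw [gct_insertBy_all]
          intro z hz
          rw [List.mem_filter] at hz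
          have := h.1 z hz.1
          simp; omega
      · simp only [Bool.not_eq_true] at hx
        simp [List.filter_cons, hx]
    · simp only [PySem.List.insertBy, hlt, decide_false, Bool.false_eq_true, if_false]
      by_cases hy : P y = true
      · simp only [List.filter_cons, hy, if_pos]
        rw [ih h.2]
        by_cases hx : P x = true
        · simp only [hx, if_pos, List.filter_cons, hy]
          simp [PySem.List.insertBy, hlt]
        · simp [hx, List.filter_cons, hy]
      · simp only [Bool.not_eq_true] at hy
        simp only [List.filter_cons, hy, Bool.false_eq_true, if_false]
        rw [ih h.2]

-- filtering commutes with the whole insertion-sort fold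
lemma gct_foldl_insertBy_filter {α : Type} (key : α → Int) (P : α → Bool) :
    ∀ (l acc : List α), acc.Pairwise (fun a b => key a ≤ key b) →
      (l.foldl (fun a x => PySem.List.insertBy (fun a b => decide (key a < key b)) x a) acc).filter P
        = (l.filter P).foldl
            (fun a x => PySem.List.insertBy (fun a b => decide (key a < key b)) x a)
            (acc.filter P) := by
  intro l
  induction l with
  | nil => intro acc _; simp
  | cons x l ih =>
    intro acc hacc
    simp only [List.foldl_cons, List.filter_cons]
    rw [ih _ (gct_pairwise_insertBy key x acc hacc), gct_filter_insertBy key P x acc hacc]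
    by_cases hx : P x = true
    · simp [hx]
    · simp [hx]

-- sorted commutes with filter (stability of Python's sort)
lemma gct_sorted_filter {α : Type} (key : α → Int) (P : α → Bool) (l : List α) :
    PySem.List.sorted (l.filter P) key false = (PySem.List.sorted l key false).filter P := by
  rw [PySem.List.sorted_eq_foldl_insertBy, PySem.List.sorted_eq_foldl_insertBy]
  rw [gct_foldl_insertBy_filter key P l [] (by simp)]
  simp

-- sorting preserves each equal-weight class in order (stability)
lemma gct_sorted_class (l : List (String × Int)) (v : Int) :
    (PySem.List.sorted l (fun p => -p.2) false).filter (fun p => p.2 == v)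
      = l.filter (fun p => p.2 == v) := by
  rw [← gct_sorted_filter (fun p => -p.2) (fun p => p.2 == v) l]
  apply PySem.List.sorted_eq_self_of_pairwise
  apply List.pairwise_of_forall_mem_list
  intro a ha b hb
  rw [List.mem_filter] at ha hb
  have ha2 : a.2 = v := by simpa using ha.2
  have hb2 : b.2 = v := by simpa using hb.2
  omega

-- A's sorted value list is the weight column of B's sorted pair list
lemma gct_values_sorted (l : List (String × Int)) :
    PySem.List.sorted (l.map (fun p => p.2)) (fun v => v) true
      = (PySem.List.sorted l (fun p => -p.2) false).map (fun p => p.2) := by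
  apply PySem.List.eq_of_perm_of_pairwise_le_of_injective (fun v : Int => -v)
  · intro a b h; simpa using h
  · exact (PySem.List.sorted_perm _ _ _).trans
      (((PySem.List.sorted_perm l (fun p => -p.2) false).map _).symm)
  · exact (PySem.List.sorted_pairwise_rev (l.map (fun p => p.2)) (fun v => v)).imp
      (fun {a b} (h : b ≤ a) => neg_le_neg h)
  · exact List.pairwise_map.mpr
      ((PySem.List.sorted_pairwise l (fun p => -p.2)).imp (by intro a b h; omega))

-- B's rest list never grows by more than one per scanned cow
lemma gct_stepB_rest_le :
    ∀ (T : List (String × Int)) (st : List String × List (String × Int) × Int),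
      ((T.foldl gctStepB st).2.1).length ≤ st.2.1.length + T.length := by
  intro T
  induction T with
  | nil => intro st; simp
  | cons p T ih =>
    intro st
    simp only [List.foldl_cons]
    have := ih (gctStepB st p)
    unfold gctStepB at this ⊢
    split_ifs at this ⊢ <;> simp_all <;> omega

lemma gct_stepB_take (st : List String × List (String × Int) × Int) (p : String × Int)
    (h : p.2 ≤ st.2.2) : gctStepB st p = (st.1 ++ [p.1], st.2.1, st.2.2 - p.2) := by
  unfold gctStepB
  rw [if_pos h]

lemma gct_stepB_skip (st : List String × List (String × Int) × Int) (p : String × Int)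
    (h : ¬ p.2 ≤ st.2.2) : gctStepB st p = (st.1, st.2.1 ++ [p], st.2.2) := by
  unfold gctStepB
  rw [if_neg h]

-- the one-trip lemma: A's fold over the sorted weights with first-match dict deletion
-- equals B's single scan over the sorted pairs
lemma gct_trip (limit : Int) :
    ∀ (T done : List (String × Int)) (taken mini : List String) (w : Int)
      (orig : List (String × Int)),
      (∀ v : Int, orig.filter (fun p => p.2 == v) = (done ++ T).filter (fun p => p.2 == v)) →
      ((done ++ T).map Prod.fst).Nodup →
      ((done ++ T).Pairwise (fun a b => b.2 ≤ a.2)) →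
      (∀ p ∈ done, taken.contains p.1 = false → ∀ q ∈ T, q.2 = p.2 → limit < p.2 + w) →
      (∀ n, taken.contains n = true → n ∈ done.map Prod.fst) →
      ∃ taken' : List String,
        T.foldl (fun st p => gctStepA limit st p.2)
            (mini, w, PySem.Dict.mk (orig.filter (fun p => !taken.contains p.1)))
          = ((T.foldl gctStepB (mini, done.filter (fun p => !taken.contains p.1), limit - w)).1,
             limit - (T.foldl gctStepB (mini, done.filter (fun p => !taken.contains p.1), limit - w)).2.2,
             PySem.Dict.mk (orig.filter (fun p => !taken'.contains p.1)))
        ∧ (T.foldl gctStepB (mini, done.filter (fun p => !taken.contains p.1), limit - w)).2.1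
            = (done ++ T).filter (fun p => !taken'.contains p.1)
        ∧ (∀ n, taken'.contains n = true → n ∈ (done ++ T).map Prod.fst) := by
  intro T
  induction T with
  | nil =>
    intro done taken mini w orig hcls hnd hsorted hskip htk
    refine ⟨taken, ?_, by simp, by simpa using htk⟩
    simp [sub_sub_cancel]
  | cons hd T ih =>
    intro done taken mini w orig hcls hnd hsorted hskip htk
    obtain ⟨n, v⟩ := hd
    -- name disjointness facts
    have hnd' := hnd
    rw [List.map_append, List.nodup_append] at hnd'
    have hdisj : ∀ a ∈ done.map Prod.fst, a ∉ ((n, v) :: T).map Prod.fst := by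
      intro a ha hb
      exact hnd'.2.2 a ha a hb rfl
    have hndn : n ∉ done.map Prod.fst := by
      intro hcon
      exact hdisj n hcon (by simp)
    have htkn : taken.contains n = false := by
      cases h : taken.contains n with
      | false => rfl
      | true => exact absurd (htk n h) hndn
    -- order facts from sortedness
    have hsd := hsorted
    rw [List.pairwise_append] at hsd
    have hsT := hsd.2.1
    rw [List.pairwise_cons] at hsT
    by_cases hfit : v + w ≤ limit
    · -- taken: A finds exactly (n, v), the first remaining cow of weight v
      have hfind : ((orig.filter (fun p => !taken.contains p.1)).find? (fun p => p.2 == v))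
          = some (n, v) := by
        have h1 : (orig.filter (fun p => !taken.contains p.1)).filter (fun p => p.2 == v)
            = ((done ++ (n, v) :: T).filter (fun p => p.2 == v)).filter
                (fun p => !taken.contains p.1) := by
          rw [List.filter_comm, hcls v]
        have h2 : (done.filter (fun p => p.2 == v)).filter (fun p => !taken.contains p.1)
            = [] := by
          rw [List.filter_eq_nil_iff]
          intro p hp
          rw [List.mem_filter] at hp
          have hp2 : p.2 = v := by simpa using hp.2
          intro hcf
      -- a skipped cow of weight v would contradict hfit
          simp only [Bool.not_eq_true'] at hcf
          have := hskip p hp.1 hcf (n, v) (by simp) (by simpa using hp2.symm)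
          omega
        rw [List.filter_append, List.filter_cons] at h1
        simp only [beq_self_eq_true, if_pos, if_true] at h1
        rw [List.filter_append, h2, List.filter_cons] at h1
        simp only [htkn, Bool.not_false, if_pos, if_true, List.nil_append] at h1
        exact gct_find?_of_filter _ _ _ _ h1
      have hstepA : gctStepA limit
            (mini, w, PySem.Dict.mk (orig.filter (fun p => !taken.contains p.1))) v
          = (mini ++ [n], v + w,
             PySem.Dict.mk (orig.filter (fun p => !(n :: taken).contains p.1))) := by
        unfold gctStepA
        simp only [hfit, if_pos, hfind, if_true]
        refine congrArg _ (congrArg _ ?_)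
        apply PySem.Dict.ext
        show List.filter _ (List.filter _ _) = _
        rw [List.filter_filter]
        apply List.filter_congr
        intro p _
        by_cases hpn : p.1 = n <;> simp [hpn, List.contains_cons]
      have hstepB : gctStepB (mini, done.filter (fun p => !taken.contains p.1), limit - w) (n, v)
          = (mini ++ [n], done.filter (fun p => !taken.contains p.1), limit - w - v) :=
        gct_stepB_take _ _ (by show v ≤ limit - w; omega)
      have hdone' : (done ++ [(n, v)]).filter (fun p => !(n :: taken).contains p.1)
          = done.filter (fun p => !taken.contains p.1) := by
        rw [List.filter_append]
        have h3 : ([(n, v)] : List (String × Int)).filter (fun p => !(n :: taken).contains p.1)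
            = [] := by simp [List.contains_cons]
        rw [h3, List.append_nil]
        apply List.filter_congr
        intro p hp
        have hpn : p.1 ≠ n := by
          intro h
          exact hndn (h ▸ List.mem_map_of_mem hp)
        simp [List.contains_cons, hpn]
      obtain ⟨tk', hA, hrest, htk'⟩ :=
        ih (done ++ [(n, v)]) (n :: taken) (mini ++ [n]) (v + w) orig
          (by simpa [List.append_assoc] using hcls)
          (by simpa [List.append_assoc] using hnd)
          (by simpa [List.append_assoc] using hsorted)
          (by
            intro p hp hcf q hq hqv
            rcases List.mem_append.mp hp with hp' | hp'
            · have hc1 : taken.contains p.1 = false := by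
                simp only [List.contains_cons, Bool.or_eq_false_iff] at hcf
                exact hcf.2
              have hw := hskip p hp' hc1 q (List.mem_cons_of_mem _ hq) hqv
              by_cases hv : 0 ≤ v
              · omega
              · -- v < 0: then p, q and (n,v) all have the same weight, contradicting hfit
                have hvp : v ≤ p.2 := hsd.2.2 p hp' (n, v) (by simp)
                have hpv : q.2 ≤ v := hsT.1 q hq
                have hpeq : p.2 = v := by omega
                have := hskip p hp' hc1 (n, v) (by simp) (by simpa using hpeq.symm)
                omega
            · have : p = (n, v) := by simpa using hp'
              subst this
              simp [List.contains_cons] at hcf)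
          (by
            intro m hm
            simp only [List.contains_cons] at hm
            rcases Bool.or_eq_true_iff.mp hm with hm | hm
            · have : m = n := by simpa using hm
              subst this
              simp
            · have := htk m hm
              rw [List.map_append, List.mem_append]
              exact Or.inl this)
      refine ⟨tk', ?_, ?_, ?_⟩
      · simp only [List.foldl_cons]
        rw [hstepA, hstepB]
        have hroom : limit - w - v = limit - (v + w) := by ring
        rw [hroom, ← hdone']
        exact hA
      · simp only [List.foldl_cons]
        rw [hstepB]
        have hroom : limit - w - v = limit - (v + w) := by ring
        rw [hroom, ← hdone']
        simpa [List.append_assoc] using hrest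
      · intro m hm
        have := htk' m hm
        simpa [List.append_assoc] using this
    · -- skipped: both sides leave the cow behind
      have hstepA : gctStepA limit
            (mini, w, PySem.Dict.mk (orig.filter (fun p => !taken.contains p.1))) v
          = (mini, w, PySem.Dict.mk (orig.filter (fun p => !taken.contains p.1))) := by
        unfold gctStepA
        rw [if_neg (by simpa using hfit)]
      have hstepB : gctStepB (mini, done.filter (fun p => !taken.contains p.1), limit - w) (n, v)
          = (mini, done.filter (fun p => !taken.contains p.1) ++ [(n, v)], limit - w) :=
        gct_stepB_skip _ _ (by show ¬ v ≤ limit - w; omega)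
      have hdone' : (done ++ [(n, v)]).filter (fun p => !taken.contains p.1)
          = done.filter (fun p => !taken.contains p.1) ++ [(n, v)] := by
        rw [List.filter_append]
        have hnt : n ∉ taken := by simpa using htkn
        simp [hnt]
      obtain ⟨tk', hA, hrest, htk'⟩ :=
        ih (done ++ [(n, v)]) taken mini w orig
          (by simpa [List.append_assoc] using hcls)
          (by simpa [List.append_assoc] using hnd)
          (by simpa [List.append_assoc] using hsorted)
          (by
            intro p hp hcf q hq hqv
            rcases List.mem_append.mp hp with hp' | hp'
            · exact hskip p hp' hcf q (List.mem_cons_of_mem _ hq) hqv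
            · have : p = (n, v) := by simpa using hp'
              subst this
              simpa using (by omega : limit < v + w))
          (by
            intro m hm
            rw [List.map_append, List.mem_append]
            exact Or.inl (htk m hm))
      refine ⟨tk', ?_, ?_, ?_⟩
      · simp only [List.foldl_cons]
        rw [hstepA, hstepB, ← hdone']
        exact hA
      · simp only [List.foldl_cons]
        rw [hstepB, ← hdone']
        simpa [List.append_assoc] using hrest
      · intro m hm
        have := htk' m hm
        simpa [List.append_assoc] using this

-- the synchronized while-loops
lemma gct_loop (limit : Int) :
    ∀ (fuel : Nat) (orig : List (String × Int)) (acc : List (List String)),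
      (orig.map Prod.fst).Nodup →
      (∀ p ∈ orig, p.2 ≤ limit) →
      orig.length ≤ fuel →
      gctLoopA limit fuel (PySem.Dict.mk orig) acc
        = gctLoopB limit fuel (PySem.List.sorted orig (fun p => -p.2) false) acc := by
  intro fuel
  induction fuel with
  | zero => intro orig acc _ _ _; rfl
  | succ fuel ih =>
    intro orig acc hnd hval hlen
    by_cases hnil : orig = []
    · subst hnil; rfl
    · have hSperm : (PySem.List.sorted orig (fun p => -p.2) false).Perm orig :=
        PySem.List.sorted_perm _ _ _
      have hSne : PySem.List.sorted orig (fun p => -p.2) false ≠ [] := by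
        intro h; exact hnil ((PySem.List.sorted_eq_nil_iff _ _ _).mp h)
      have hitems : (PySem.Dict.mk orig).items = orig := rfl
      have hvalues : (PySem.Dict.mk orig).values = orig.map (fun p => p.2) := rfl
      simp only [gctLoopA, gctLoopB, hitems, hvalues]
      rw [if_neg hnil, if_neg hSne, gct_values_sorted orig, List.foldl_map]
      -- one trip
      obtain ⟨tk', hA, hrest, htk'⟩ :=
        gct_trip limit (PySem.List.sorted orig (fun p => -p.2) false) [] [] [] 0 orig
          (fun v => by rw [List.nil_append]; exact (gct_sorted_class orig v).symm)
          (by rw [List.nil_append]; exact ((hSperm.map Prod.fst).nodup_iff).mpr hnd)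
          (by
            rw [List.nil_append]
            exact (PySem.List.sorted_pairwise orig (fun p => -p.2)).imp
              (fun {a b} (h : -a.2 ≤ -b.2) => by omega))
          (by intro p hp; simp at hp)
          (by intro m hm; simp at hm)
      have hfe : orig.filter (fun p => !(([] : List String).contains p.1)) = orig := by simp
      simp only [List.nil_append, List.filter_nil, sub_zero, hfe] at hA hrest
      rw [hA, hrest]
      -- the next round: strictly fewer cows remain
      obtain ⟨s0, S', hcons⟩ := List.exists_cons_of_ne_nil hSne
      have h0 : s0.2 ≤ limit := hval s0 (hSperm.subset (hcons ▸ List.mem_cons_self ..))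
      have hrl : ((PySem.List.sorted orig (fun p => -p.2) false).foldl gctStepB
          ([], [], limit)).2.1.length ≤ S'.length := by
        rw [hcons, List.foldl_cons, gct_stepB_take _ _ (by show s0.2 ≤ limit; exact h0)]
        simpa using gct_stepB_rest_le S' ([s0.1], [], limit - s0.2)
      have hlS : (PySem.List.sorted orig (fun p => -p.2) false).length = orig.length :=
        PySem.List.length_sorted _ _ _
      have hlen' : (orig.filter (fun p => !tk'.contains p.1)).length ≤ fuel := by
        have hpf := (hSperm.filter (fun p => !tk'.contains p.1)).length_eq
        rw [← hpf, ← hrest]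
        have : S'.length + 1 = orig.length := by
          rw [← hlS, hcons]; simp
        omega
      rw [ih (orig.filter (fun p => !tk'.contains p.1)) _
            (hnd.sublist (List.filter_sublist.map Prod.fst))
            (fun p hp => hval p (List.mem_of_mem_filter hp)) hlen',
          gct_sorted_filter]

-- A's initial 'delete the too-heavy cows' loop is a filter of the items
lemma gct_erase_loop (c : String → Prop) [DecidablePred c] :
    ∀ (ks : List String) (kr : PySem.Dict String Int),
      (ks.foldl (fun kr k => if c k then kr.erase k else kr) kr).items
        = kr.items.filter (fun p => !(ks.contains p.1 && decide (c p.1))) := by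
  intro ks
  induction ks with
  | nil => intro kr; simp
  | cons k ks ih =>
    intro kr
    simp only [List.foldl_cons]
    by_cases hc : c k
    · rw [if_pos hc, ih]
      have herase : (kr.erase k).items = kr.items.filter (fun p => !(p.1 == k)) := rfl
      rw [herase, List.filter_filter]
      apply List.filter_congr
      intro p _
      by_cases hk : p.1 = k <;> simp [hk, hc, List.contains_cons]
    · rw [if_neg hc, ih]
      apply List.filter_congr
      intro p _
      by_cases hk : p.1 = k <;> simp [hk, hc, List.contains_cons]

-- ===== VERDICT (by name: the statement is the Claim_ definition above) =====
theorem greedy_cow_transport_spec : Claim_equal_greedy_cow_transport := by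
  intro cows limit _
  unfold Spec_greedy_cow_transport
  simp only [greedy_cow_transport, greedy_cow_transport_alt]
  have hkravy : ((PySem.Dict.ofList cows).keys.foldl
        (fun kr krava => if limit < (PySem.Dict.ofList cows).getD krava 0 then kr.erase krava else kr)
        (PySem.Dict.ofList cows))
      = PySem.Dict.mk ((PySem.Dict.ofList cows).items.filter (fun p => decide (p.2 ≤ limit))) := by
    apply PySem.Dict.ext
    rw [gct_erase_loop]
    apply List.filter_congr
    intro p hp
    obtain ⟨a, b⟩ := p
    have hk : (PySem.Dict.ofList cows).keys.contains a = true := by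
      have : a ∈ (PySem.Dict.ofList cows).keys := List.mem_map_of_mem hp
      simpa using this
    have hg : (PySem.Dict.ofList cows).getD a 0 = b :=
      PySem.Dict.getD_of_mem_items _ hp (PySem.Dict.nodup_keys_ofList cows) 0
    simp only [hk, hg, Bool.true_and]
    by_cases h : b ≤ limit <;> simp [h] <;> omega
  rw [hkravy]
  have hsz : (PySem.Dict.mk ((PySem.Dict.ofList cows).items.filter
      (fun p => decide (p.2 ≤ limit)))).size
      = ((PySem.Dict.ofList cows).items.filter (fun p => decide (p.2 ≤ limit))).length := rfl
  rw [hsz, PySem.List.length_sorted]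
  exact gct_loop limit _ _ []
    ((PySem.Dict.nodup_keys_ofList cows).sublist (List.filter_sublist.map Prod.fst))
    (fun p hp => by simpa using (List.mem_filter.mp hp).2)
    (Nat.le_succ _)
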